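-- pv_equiv track=rewrite | github.com/dreamrec/touchdesigner-mcp | src/td_mcp/server.py | _format_params_markdown
-- ===== SOURCE A (Python) =====
-- def _format_params_markdown(params: dict, path: str) -> str:
--     """Format parameters as readable markdown."""
--     if not params:
--         return f"No parameters found for `{path}`."
--
--     lines = [f"## Parameters for `{path}`\n"]
--     current_page = None
--     for name, info in sorted(params.items(), key=lambda x: (x[1].get('page', ''), x[0])):
--         page = info.get('page', '')
--         if page != current_page:
--             current_page = page
--             lines.append(f"\n### {page or 'Default'}\n")
--         val = info.get('value', '')
--         default = info.get('default', '')
--         label = info.get('label', name)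
--         marker = " *(modified)*" if val != default else ""
--         lines.append(f"- **{label}** (`{name}`): `{val}`{marker}")
--     return "\n".join(lines)
-- ===== SOURCE B (Python) =====
-- def _format_params_markdown(params: dict, path: str) -> str:
--     """Format parameters as readable markdown (grouped by page first, then emitted)."""
--     if not params:
--         return f"No parameters found for `{path}`."
--
--     groups = {}
--     for name, info in params.items():
--         groups.setdefault(info.get('page', ''), []).append((name, info))
--
--     out = [f"## Parameters for `{path}`\n"]
--     for page in sorted(groups):
--         out.append(f"\n### {page or 'Default'}\n")
--         for name, info in sorted(groups[page], key=lambda e: e[0]):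
--             val = info.get('value', '')
--             marker = " *(modified)*" if val != info.get('default', '') else ""
--             out.append(f"- **{info.get('label', name)}** (`{name}`): `{val}`{marker}")
--     return "\n".join(out)
-- ===== Notes on version B (the rewrite author's own statement) =====
-- stated objective: alternative
-- what changed: Replaces the single sorted-by-(page,name) pass with header-on-page-change state by a group-by-page dict built in one scan, then a nested loop over sorted pages and, inside each page, name-sorted entries.
import Mathlib
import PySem

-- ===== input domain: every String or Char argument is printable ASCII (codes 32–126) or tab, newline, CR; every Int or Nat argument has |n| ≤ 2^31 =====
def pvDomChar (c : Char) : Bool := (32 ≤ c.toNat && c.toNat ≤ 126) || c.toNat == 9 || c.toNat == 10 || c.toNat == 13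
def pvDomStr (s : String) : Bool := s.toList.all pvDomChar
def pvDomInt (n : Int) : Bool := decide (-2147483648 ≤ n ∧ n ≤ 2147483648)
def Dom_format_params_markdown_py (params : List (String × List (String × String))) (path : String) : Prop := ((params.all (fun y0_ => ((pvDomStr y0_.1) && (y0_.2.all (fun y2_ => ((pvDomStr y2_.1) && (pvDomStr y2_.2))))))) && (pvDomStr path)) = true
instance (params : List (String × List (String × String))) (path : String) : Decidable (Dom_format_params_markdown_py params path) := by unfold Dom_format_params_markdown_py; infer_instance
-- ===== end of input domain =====

-- B groups parameters by page into a dict in one scan, then emits sorted pages with name-sorted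
-- entries in a nested loop, instead of A's single (page, name)-sorted pass with header-on-change
-- state; an alternative decomposition of the same cost.


-- ===== PORT A =====
-- helpers shared by both ports: the exact f-string pieces both Python sources emit
def pvPage (info : List (String × String)) : String :=
  (PySem.Dict.ofList info).getD "page" ""

def pvHeader (page : String) : String :=
  "\n### " ++ (if page = "" then "Default" else page) ++ "\n"

def pvLine (x : String × List (String × String)) : String :=
  let info := PySem.Dict.ofList x.2
  let val := info.getD "value" ""
  let dflt := info.getD "default" ""
  let label := info.getD "label" x.1
  let marker := if val ≠ dflt then " *(modified)*" else ""
  "- **" ++ label ++ "** (`" ++ x.1 ++ "`): `" ++ val ++ "`" ++ marker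

-- the body of A's for-loop: state = (current_page, lines)
def pvStep (st : Option String × List String) (x : String × List (String × String)) :
    Option String × List String :=
  let page := pvPage x.2
  let st' := if some page ≠ st.1 then (some page, st.2 ++ [pvHeader page]) else st
  (st'.1, st'.2 ++ [pvLine x])

def format_params_markdown_py (params : List (String × List (String × String))) (path : String) : String :=
  if params = [] then "No parameters found for `" ++ path ++ "`."
  else
    let d := PySem.Dict.ofList params
    let r := (PySem.List.sorted2 d.items (fun x => pvPage x.2) (fun x => x.1)).foldl
        pvStep (none, ["## Parameters for `" ++ path ++ "`\n"])
    PySem.Str.join "\n" r.2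

-- ===== PORT B =====
def format_params_markdown_py_alt (params : List (String × List (String × String))) (path : String) : String :=
  if params = [] then "No parameters found for `" ++ path ++ "`."
  else
    let d := PySem.Dict.ofList params
    let groups := d.items.foldl
        (fun (g : PySem.Dict String (List (String × List (String × String)))) x =>
          g.modify (pvPage x.2) [] (fun es => es ++ [x]))
        PySem.Dict.empty
    let out := (PySem.List.sorted groups.keys (fun p => p)).foldl
        (fun acc page =>
          (PySem.List.sorted (groups.getD page []) (fun e => e.1)).foldl
            (fun a e => a ++ [pvLine e]) (acc ++ [pvHeader page]))
        ["## Parameters for `" ++ path ++ "`\n"]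
    PySem.Str.join "\n" out

-- ===== PRECONDITION & SPEC =====
def Spec_format_params_markdown_py (params : List (String × List (String × String))) (path : String) (out : String) : Prop := out = format_params_markdown_py_alt params path
instance (params : List (String × List (String × String))) (path : String) (out : String) : Decidable (Spec_format_params_markdown_py params path out) := by unfold Spec_format_params_markdown_py; infer_instance

-- ===== CLAIM (what is proved, stated in full; the proofs are below) =====
def Claim_equal_format_params_markdown_py : Prop := ∀ (params : List (String × List (String × String))) (path : String), Dom_format_params_markdown_py params path → Spec_format_params_markdown_py params path (format_params_markdown_py params path)

-- ===== LEMMAS AND PROOFS =====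
theorem pv_run_same {p : String} :
    ∀ (es : List (String × List (String × String))) (acc : List String),
    (∀ x ∈ es, pvPage x.2 = p) →
    es.foldl pvStep (some p, acc) = (some p, acc ++ es.map pvLine) := by
  intro es
  induction es with
  | nil => intro acc _; simp
  | cons x t ih =>
    intro acc h
    have hx : pvPage x.2 = p := h x (by simp)
    simp only [List.foldl_cons, pvStep, hx]
    simp only [ne_eq, not_true_eq_false, if_false]
    rw [ih (acc ++ [pvLine x]) (fun y hy => h y (by simp [hy]))]
    simp

theorem pv_run_block {p : String} :
    ∀ (es : List (String × List (String × String))) (c : Option String) (acc : List String),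
    es ≠ [] → (∀ x ∈ es, pvPage x.2 = p) → c ≠ some p →
    es.foldl pvStep (c, acc) = (some p, (acc ++ [pvHeader p]) ++ es.map pvLine) := by
  intro es c acc hne h hc
  match es with
  | x :: t =>
    have hx : pvPage x.2 = p := h x (by simp)
    simp only [List.foldl_cons, pvStep, hx]
    rw [if_pos (fun h' => hc h'.symm)]
    rw [pv_run_same t _ (fun y hy => h y (by simp [hy]))]
    simp

theorem pv_run_blocks (E : String → List (String × List (String × String))) :
    ∀ (ps : List String) (c : Option String) (acc : List String),
    ps.Pairwise (· < ·) → (∀ q ∈ ps, c ≠ some q) →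
    (∀ p ∈ ps, E p ≠ [] ∧ ∀ x ∈ E p, pvPage x.2 = p) →
    ((ps.flatMap E).foldl pvStep (c, acc)).2
      = ps.foldl (fun a p => (a ++ [pvHeader p]) ++ (E p).map pvLine) acc := by
  intro ps
  induction ps with
  | nil => intro c acc _ _ _; simp
  | cons p rest ih =>
    intro c acc hpw hc hE
    rcases List.pairwise_cons.mp hpw with ⟨hlt, hpw'⟩
    rcases hE p (by simp) with ⟨hne, hpg⟩
    simp only [List.flatMap_cons, List.foldl_append, List.foldl_cons]
    rw [pv_run_block (E p) c acc hne hpg (hc p (by simp))]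
    exact ih (some p) _ hpw'
      (fun q hq h' => (ne_of_lt (hlt q hq)) (Option.some.inj h'))
      (fun q hq => hE q (by simp [hq]))

def pvKey (x : String × List (String × String)) : Lex (String × String) :=
  toLex (pvPage x.2, x.1)

theorem pv_block_pages (items : List (String × List (String × String))) (p : String)
    (x : String × List (String × String))
    (hx : x ∈ PySem.List.sorted (items.filter (fun y => pvPage y.2 == p)) (fun e => e.1)) :
    pvPage x.2 = p := by
  have := (PySem.List.mem_sorted _ _ _ _).mp hx
  have := List.of_mem_filter this
  simpa using this

theorem pv_flatMap_pairwise (items : List (String × List (String × String)))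
    (hnames : (items.map (fun x => x.1)).Nodup) :
    (((PySem.List.sorted (PySem.Set.ofList (items.map (fun x => pvPage x.2))) (fun p => p)).flatMap
      (fun p => PySem.List.sorted (items.filter (fun y => pvPage y.2 == p)) (fun e => e.1))).Pairwise
      (fun a b => pvKey a < pvKey b)) := by
  rw [List.flatMap_def, List.pairwise_flatten]
  constructor
  · -- each block is strictly increasing in pvKey (pages equal inside, names strict)
    intro l hl
    rcases List.mem_map.mp hl with ⟨p, hp, rfl⟩
    have hpw : ((PySem.List.sorted (items.filter (fun y => pvPage y.2 == p)) (fun e => e.1)).map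
        (fun e => e.1)).Pairwise (· ≤ ·) := PySem.List.sorted_map_key_pairwise _ _
    have hndb : ((PySem.List.sorted (items.filter (fun y => pvPage y.2 == p)) (fun e => e.1)).map
        (fun e => e.1)).Nodup := by
      have hperm := (PySem.List.sorted_perm (items.filter (fun y => pvPage y.2 == p)) (fun e => e.1) false).map (fun e => e.1)
      have hsub : ((items.filter (fun y => pvPage y.2 == p)).map (fun e => e.1)).Sublist
          (items.map (fun x => x.1)) := List.Sublist.map (fun (e : String × List (String × String)) => e.1) List.filter_sublist
      exact (hperm.nodup_iff).mpr (hsub.nodup hnames)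
    have hlt : ((PySem.List.sorted (items.filter (fun y => pvPage y.2 == p)) (fun e => e.1)).map
        (fun e => e.1)).Pairwise (· < ·) := by
      have := hpw.and (List.nodup_iff_pairwise_ne.mp hndb)
      exact this.imp (fun h => lt_of_le_of_ne h.1 h.2)
    have hlt' := List.pairwise_map.mp hlt
    refine hlt'.imp_of_mem ?_
    intro a b ha hb h
    have hpa := pv_block_pages items p a ha
    have hpb := pv_block_pages items p b hb
    simp only [pvKey, Prod.Lex.lt_iff, hpa, hpb]
    exact Or.inr ⟨rfl, h⟩
  · -- across blocks: pages strictly increase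
    have hppw : (PySem.List.sorted (PySem.Set.ofList (items.map (fun x => pvPage x.2))) (fun p => p)).Pairwise (· < ·) :=
      PySem.List.sorted_ofList_pairwise_lt _
    rw [List.pairwise_map]
    refine hppw.imp_of_mem ?_
    intro p q hp hq hlt x hx y hy
    have hpx := pv_block_pages items p x hx
    have hpy := pv_block_pages items q y hy
    simp only [pvKey, Prod.Lex.lt_iff, hpx, hpy]
    exact Or.inl hlt

theorem pv_sorted2_eq_sorted_lex {α : Type} (xs : List α) (k1 k2 : α → String) :
    PySem.List.sorted2 xs k1 k2 = PySem.List.sorted xs (fun x => toLex (k1 x, k2 x)) := by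
  simp only [PySem.List.sorted2, PySem.List.sorted]
  have hb : (fun (a b : α) => decide (k1 a < k1 b) || (!decide (k1 b < k1 a) && decide (k2 a < k2 b)))
      = (fun a b => decide (toLex (k1 a, k2 a) < toLex (k1 b, k2 b))) := by
    funext a b
    rcases lt_trichotomy (k1 a) (k1 b) with h | h | h
    · simp [h, Prod.Lex.lt_iff]
    · simp [h, Prod.Lex.lt_iff]
    · simp [h, Prod.Lex.lt_iff, lt_asymm h, ne_of_gt h]
  simp only [Bool.false_eq_true, if_false, hb]

theorem pv_flatMap_perm {α : Type} (ps : List String) (E F : String → List α)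
    (h : ∀ p ∈ ps, (E p).Perm (F p)) :
    (ps.flatMap E).Perm (ps.flatMap F) := by
  induction ps with
  | nil => simp
  | cons q rest ih =>
    simp only [List.flatMap_cons]
    exact (h q (by simp)).append (ih (fun p hp => h p (by simp [hp])))

theorem pv_flatMap_filter_cons {α : Type} (π : α → String) (x : α) (t : List α) :
    ∀ (ps : List String), ps.Nodup → π x ∈ ps →
    (ps.flatMap (fun p => (x :: t).filter (fun y => π y == p))).Perm
      (x :: ps.flatMap (fun p => t.filter (fun y => π y == p))) := by
  intro ps
  induction ps with
  | nil => intro _ h; simp at h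
  | cons q rest ih =>
    intro hnd hmem
    rcases List.nodup_cons.mp hnd with ⟨hq, hndr⟩
    simp only [List.flatMap_cons]
    by_cases hx : π x = q
    · have h1 : (x :: t).filter (fun y => π y == q) = x :: t.filter (fun y => π y == q) := by
        simp [hx]
      have h2 : rest.flatMap (fun p => (x :: t).filter (fun y => π y == p))
          = rest.flatMap (fun p => t.filter (fun y => π y == p)) := by
        apply List.flatMap_congr
        intro p hp
        have : ¬ (π x = p) := by intro h; apply hq; rwa [← h, hx] at hp
        simp [this]
      rw [h1, h2]
      simp [List.cons_append]
    · have hmr : π x ∈ rest := by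
        rcases List.mem_cons.mp hmem with h | h
        · exact absurd h hx
        · exact h
      have h1 : (x :: t).filter (fun y => π y == q) = t.filter (fun y => π y == q) := by
        simp [hx]
      rw [h1]
      exact (List.Perm.append_left _ (ih hndr hmr)).trans List.perm_middle

theorem pv_perm_flatMap_filter {α : Type} (π : α → String) :
    ∀ (items : List α) (ps : List String), ps.Nodup → (∀ x ∈ items, π x ∈ ps) →
    (ps.flatMap (fun p => items.filter (fun y => π y == p))).Perm items := by
  intro items
  induction items with
  | nil => intro ps _ _; simp
  | cons x t ih =>
    intro ps hnd hcov
    exact (pv_flatMap_filter_cons π x t ps hnd (hcov x (by simp))).trans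
      ((ih ps hnd (fun y hy => hcov y (by simp [hy]))).cons x)

-- the sorted pages, duplicate-free
theorem pv_pages_nodup (items : List (String × List (String × String))) :
    (PySem.List.sorted (PySem.Set.ofList (items.map (fun x => pvPage x.2))) (fun p => p)).Nodup :=
  ((PySem.List.sorted_perm _ _ _).nodup_iff).mpr (PySem.Set.nodup_ofList _)

theorem pv_pages_cover (items : List (String × List (String × String)))
    (x : String × List (String × String)) (hx : x ∈ items) :
    pvPage x.2 ∈ PySem.List.sorted (PySem.Set.ofList (items.map (fun x => pvPage x.2))) (fun p => p) := by
  rw [PySem.List.mem_sorted, PySem.Set.mem_ofList]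
  exact List.mem_map.mpr ⟨x, hx, rfl⟩

-- MAIN sort characterisation: A's sorted2 pass enumerates exactly B's page blocks
theorem pv_sorted2_eq_flatMap (items : List (String × List (String × String)))
    (hnames : (items.map (fun x => x.1)).Nodup) :
    PySem.List.sorted2 items (fun x => pvPage x.2) (fun x => x.1)
      = (PySem.List.sorted (PySem.Set.ofList (items.map (fun x => pvPage x.2))) (fun p => p)).flatMap
          (fun p => PySem.List.sorted (items.filter (fun y => pvPage y.2 == p)) (fun e => e.1)) := by
  rw [pv_sorted2_eq_sorted_lex]
  apply PySem.List.sorted_eq_of_perm_of_pairwise_lt (key := pvKey)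
  · refine (pv_flatMap_perm _ _ (fun p => items.filter (fun y => pvPage y.2 == p)) ?_).trans
      (pv_perm_flatMap_filter (fun x => pvPage x.2) items _ (pv_pages_nodup items) (pv_pages_cover items))
    intro p _
    exact PySem.List.sorted_perm _ _ _
  · exact pv_flatMap_pairwise items hnames

theorem pv_main (params : List (String × List (String × String))) (path : String) :
    format_params_markdown_py params path = format_params_markdown_py_alt params path := by
  by_cases hp : params = []
  · simp [format_params_markdown_py, format_params_markdown_py_alt, hp]
  · simp only [format_params_markdown_py, format_params_markdown_py_alt, if_neg hp]
    set items := (PySem.Dict.ofList params).items with hitems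
    have hnames : (items.map (fun x => x.1)).Nodup := by
      have := PySem.Dict.nodup_keys_ofList params
      simpa [PySem.Dict.keys, hitems] using this
    set pages := PySem.List.sorted (PySem.Set.ofList (items.map (fun x => pvPage x.2))) (fun p => p) with hpages
    set E : String → List (String × List (String × String)) :=
      fun p => PySem.List.sorted (items.filter (fun y => pvPage y.2 == p)) (fun e => e.1) with hE
    -- B's groups
    set groups := items.foldl
        (fun (g : PySem.Dict String (List (String × List (String × String)))) x =>
          g.modify (pvPage x.2) [] (fun es => es ++ [x]))
        PySem.Dict.empty with hgroups
    have hkeys : groups.keys = PySem.Set.ofList (items.map (fun x => pvPage x.2)) := by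
      rw [hgroups, PySem.Dict.keys_foldl_modify_key items (fun x => pvPage x.2) []
        (fun _ x => fun es => es ++ [x]) PySem.Dict.empty]
      simp [PySem.Set.update_nil_left]
    have hgetD : ∀ p, groups.getD p [] = items.filter (fun y => pvPage y.2 == p) := by
      intro p
      have hfold : groups = (items.map (fun x => (pvPage x.2, x))).foldl
          (fun g pr => g.modify pr.1 [] (fun es => es ++ [pr.2])) PySem.Dict.empty := by
        rw [hgroups, List.foldl_map]
      rw [hfold, PySem.Dict.getD_foldl_modify_append]
      simp [List.filter_map, Function.comp_def]
    -- A's sorted pass is the concatenation of B's blocks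
    rw [pv_sorted2_eq_flatMap items hnames]
    have hA := pv_run_blocks E pages none ["## Parameters for `" ++ path ++ "`\n"]
      (PySem.List.sorted_ofList_pairwise_lt _)
      (fun q _ h => by simp at h)
      (by
        intro p hpmem
        constructor
        · rw [hE, Ne, PySem.List.sorted_eq_nil_iff, List.filter_eq_nil_iff]
          intro hall
          rw [hpages, PySem.List.mem_sorted, PySem.Set.mem_ofList] at hpmem
          rcases List.mem_map.mp hpmem with ⟨x, hx, rfl⟩
          exact hall x hx (by simp)
        · exact fun x hx => pv_block_pages items p x hx)
    rw [← hpages, ← hE] at *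
    rw [hA]
    -- rewrite B's outer fold body
    have hfun : (fun (acc : List String) page =>
          (PySem.List.sorted (groups.getD page []) (fun e => e.1)).foldl
            (fun a e => a ++ [pvLine e]) (acc ++ [pvHeader page]))
        = (fun acc p => (acc ++ [pvHeader p]) ++ (E p).map pvLine) := by
      funext acc page
      rw [hgetD page, PySem.List.foldl_append_singleton_eq_map, hE]
    rw [hkeys, hfun]

-- ===== VERDICT (by name: the statement is the Claim_ definition above) =====
theorem format_params_markdown_py_spec : Claim_equal_format_params_markdown_py := by
  intro params path _
  unfold Spec_format_params_markdown_py
  exact pv_main params path
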